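-- pv_equiv track=rewrite | github.com/alexjst/algorithms | Python/companies/Faire/06_ads_assortment_problem_solution.py | get_blocked_customers
-- ===== SOURCE A (Python) =====
-- from typing import List, Tuple
-- from collections import defaultdict
--
-- def get_blocked_customers(sent_ads: List[Tuple[str, str, int]], new_ad: Tuple[str, str, int]) -> List[str]:
--     """
--     Determine which customers should be blocked from receiving the new ad.
--
--     Args:
--         sent_ads: List of (ad_name, customer, day_number) tuples
--         new_ad: Tuple (ad_name, customer, day_number) for the new ad to send
--
--     Returns:
--         List of customer IDs who should be BLOCKED from receiving the new ad
--
--     Examples: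
--         >>> sent_ads = [('ad1', 'alice', 1), ('ad2', 'alice', 2), ('ad3', 'alice', 3)]
--         >>> new_ad = ('ad4', 'alice', 4)
--         >>> get_blocked_customers(sent_ads, new_ad)
--         ['alice']  # Alice already has 3 ads in week 1
--
--         >>> sent_ads = [('ad1', 'alice', 1)]
--         >>> new_ad = ('ad1', 'alice', 5)
--         >>> get_blocked_customers(sent_ads, new_ad)
--         ['alice']  # Alice already received 'ad1' in week 1
--     """
--     # Extract new ad information
--     new_ad_name, new_customer, new_day = new_ad
--     new_week = (new_day - 1) // 7 + 1
--
--     # TODO: Build data structure to track: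
--     # 1. Which ads each customer received in each week
--     # 2. How many ads each customer received in each week
--
--     # Hint: Use nested dictionaries
--     # customer_ads[customer][week] = set of ad names
--     # customer_counts[customer][week] = count of ads
--
--     customer_ads = defaultdict(lambda: defaultdict(set))
--     customer_counts = defaultdict(lambda: defaultdict(int))
--
--     # TODO: Process all sent ads
--     for ad_name, customer, day in sent_ads:
--         week = (day - 1) // 7 + 1
--         customer_ads[customer][week].add(ad_name)
--         customer_counts[customer][week] += 1
--
--     # TODO: Check blocking conditions for the new customer
--     blocked = []
--
--     # Check if customer should be blocked
--     # Condition 1: Same ad already received in the same week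
--     if new_ad_name in customer_ads[new_customer][new_week]:
--         blocked.append(new_customer)
--     # Condition 2: Customer already has 3 ads in the week
--     elif customer_counts[new_customer][new_week] >= 3:
--         blocked.append(new_customer)
--
--     return blocked
-- ===== SOURCE B (Python) =====
-- from typing import List, Tuple
--
-- def get_blocked_customers(sent_ads: List[Tuple[str, str, int]], new_ad: Tuple[str, str, int]) -> List[str]:
--     new_ad_name, new_customer, new_day = new_ad
--     new_week = (new_day - 1) // 7 + 1
--     count = 0
--     seen_same_ad = False
--     for ad_name, customer, day in sent_ads:
--         if customer == new_customer and (day - 1) // 7 + 1 == new_week: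
--             count += 1
--             seen_same_ad = seen_same_ad or ad_name == new_ad_name
--     if seen_same_ad:
--         return [new_customer]
--     elif count >= 3:
--         return [new_customer]
--     else:
--         return []
-- ===== Notes on version B (the rewrite author's own statement) =====
-- stated objective: simpler
-- what changed: Replaces the two nested defaultdict indexes over all customers/weeks with a single pass keeping just two scalars (a count and a seen-ad flag) for the one relevant customer/week bucket.
import Mathlib
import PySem

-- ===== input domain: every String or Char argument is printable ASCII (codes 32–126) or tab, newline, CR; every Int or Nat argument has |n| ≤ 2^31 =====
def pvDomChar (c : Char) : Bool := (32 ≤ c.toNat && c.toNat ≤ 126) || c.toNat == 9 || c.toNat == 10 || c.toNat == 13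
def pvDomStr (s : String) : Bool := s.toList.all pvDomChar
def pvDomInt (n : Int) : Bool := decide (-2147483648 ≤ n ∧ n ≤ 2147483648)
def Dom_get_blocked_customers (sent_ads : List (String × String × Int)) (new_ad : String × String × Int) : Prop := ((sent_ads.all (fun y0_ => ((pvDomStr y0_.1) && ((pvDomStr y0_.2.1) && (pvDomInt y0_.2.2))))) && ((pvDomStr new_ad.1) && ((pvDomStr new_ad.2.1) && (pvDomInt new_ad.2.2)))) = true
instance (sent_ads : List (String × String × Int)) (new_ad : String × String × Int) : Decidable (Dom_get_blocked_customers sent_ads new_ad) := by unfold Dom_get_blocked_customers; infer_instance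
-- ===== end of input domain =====

-- B replaces A's nested per-customer/per-week dict indexes with a single pass keeping two
-- scalars (count and a seen-same-ad flag) for the one relevant customer/week bucket (simpler).

-- ===== PORT A =====
-- loop body of A: update both nested defaultdicts for one sent ad
def pvAStep (st : PySem.Dict String (PySem.Dict Int (PySem.Set String)) × PySem.Dict String (PySem.Dict Int Int))
    (ad : String × String × Int) :
    PySem.Dict String (PySem.Dict Int (PySem.Set String)) × PySem.Dict String (PySem.Dict Int Int) :=
  let week := PySem.Int.floordiv (ad.2.2 - 1) 7 + 1
  let inner1 := st.1.getD ad.2.1 PySem.Dict.empty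
  let ca := st.1.insert ad.2.1 (inner1.insert week (PySem.Set.add (inner1.getD week PySem.Set.empty) ad.1))
  let inner2 := st.2.getD ad.2.1 PySem.Dict.empty
  let cc := st.2.insert ad.2.1 (inner2.insert week (inner2.getD week 0 + 1))
  (ca, cc)

def get_blocked_customers (sent_ads : List (String × String × Int)) (new_ad : String × String × Int) : List String :=
  let new_ad_name := new_ad.1
  let new_customer := new_ad.2.1
  let new_day := new_ad.2.2
  let new_week := PySem.Int.floordiv (new_day - 1) 7 + 1
  let st := sent_ads.foldl pvAStep (PySem.Dict.empty, PySem.Dict.empty)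
  let blocked : List String := []
  if PySem.Set.contains ((st.1.getD new_customer PySem.Dict.empty).getD new_week PySem.Set.empty) new_ad_name then
    blocked ++ [new_customer]
  else if 3 ≤ (st.2.getD new_customer PySem.Dict.empty).getD new_week 0 then
    blocked ++ [new_customer]
  else blocked

-- ===== PORT B =====
-- loop body of B: bump the scalar count / flag when the ad hits the relevant bucket
def pvBStep (cust : String) (name : String) (week : Int) (st : Int × Bool) (ad : String × String × Int) : Int × Bool :=
  if ad.2.1 == cust && (PySem.Int.floordiv (ad.2.2 - 1) 7 + 1 == week) then
    (st.1 + 1, st.2 || (ad.1 == name))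
  else st

def get_blocked_customers_alt (sent_ads : List (String × String × Int)) (new_ad : String × String × Int) : List String :=
  let new_ad_name := new_ad.1
  let new_customer := new_ad.2.1
  let new_week := PySem.Int.floordiv (new_ad.2.2 - 1) 7 + 1
  let r := sent_ads.foldl (pvBStep new_customer new_ad_name new_week) (0, false)
  if r.2 then [new_customer]
  else if 3 ≤ r.1 then [new_customer]
  else []

-- ===== PRECONDITION & SPEC =====
def Spec_get_blocked_customers (sent_ads : List (String × String × Int)) (new_ad : String × String × Int) (out : List String) : Prop := out = get_blocked_customers_alt sent_ads new_ad
instance (sent_ads : List (String × String × Int)) (new_ad : String × String × Int) (out : List String) : Decidable (Spec_get_blocked_customers sent_ads new_ad out) := by unfold Spec_get_blocked_customers; infer_instance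

-- ===== CLAIM (what is proved, stated in full; the proofs are below) =====
def Claim_equal_get_blocked_customers : Prop := ∀ (sent_ads : List (String × String × Int)) (new_ad : String × String × Int), Dom_get_blocked_customers sent_ads new_ad → Spec_get_blocked_customers sent_ads new_ad (get_blocked_customers sent_ads new_ad)

-- ===== LEMMAS AND PROOFS =====
-- membership in a Python set after .add(x), as the Bool test A's final check performs
theorem pv_contains_add (s : PySem.Set String) (x y : String) :
    decide (y ∈ PySem.Set.add s x) = (decide (y ∈ s) || (x == y)) := by
  by_cases h2 : x = y
  · subst h2; simp [PySem.Set.mem_add]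
  · simp [PySem.Set.mem_add, h2, Ne.symm h2]

-- Invariant: throughout the fold, A's bucket for (cust, week) agrees with B's scalars.
theorem pv_loop_inv (name cust : String) (week : Int) (l : List (String × String × Int))
    (ca : PySem.Dict String (PySem.Dict Int (PySem.Set String)))
    (cc : PySem.Dict String (PySem.Dict Int Int)) (count : Int) (flag : Bool)
    (hf : PySem.Set.contains ((ca.getD cust PySem.Dict.empty).getD week PySem.Set.empty) name = flag)
    (hc : (cc.getD cust PySem.Dict.empty).getD week 0 = count) :
    PySem.Set.contains (((l.foldl pvAStep (ca, cc)).1.getD cust PySem.Dict.empty).getD week PySem.Set.empty) name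
      = (l.foldl (pvBStep cust name week) (count, flag)).2
    ∧ ((l.foldl pvAStep (ca, cc)).2.getD cust PySem.Dict.empty).getD week 0
      = (l.foldl (pvBStep cust name week) (count, flag)).1 := by
  induction l generalizing ca cc count flag with
  | nil => exact ⟨hf, hc⟩
  | cons ad tl ih =>
    simp only [List.foldl_cons]
    have hw7 : PySem.Int.floordiv (ad.2.2 - 1) 7 = (ad.2.2 - 1) / 7 :=
      PySem.Int.floordiv_eq_ediv_of_pos (by norm_num)
    by_cases hcust : ad.2.1 = cust
    · by_cases hweek : (ad.2.2 - 1) / 7 + 1 = week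
      · -- the sent ad hits the relevant bucket: count bumps, flag absorbs (ad.1 == name)
        rw [show pvBStep cust name week (count, flag) ad = (count + 1, flag || (ad.1 == name)) from by
          simp [pvBStep, hcust, hw7, hweek]]
        apply ih
        · simp [pvAStep, hcust, hweek, PySem.Set.contains, pv_contains_add, ← hf]
          by_cases h : ad.1 = name <;> simp [h, Ne.symm]
        · simp [hcust, hweek, hc, pvAStep]
      · -- same customer, different week: the bucket is untouched
        rw [show pvBStep cust name week (count, flag) ad = (count, flag) from by
          simp [pvBStep, hweek]]
        apply ih
        · simpa [pvAStep, hcust, hw7, PySem.Dict.getD_insert, Ne.symm hweek, hweek] using hf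
        · simpa [pvAStep, hcust, hw7, PySem.Dict.getD_insert, Ne.symm hweek, hweek] using hc
    · -- different customer: the bucket is untouched
      rw [show pvBStep cust name week (count, flag) ad = (count, flag) from by
        simp [pvBStep, hcust]]
      apply ih
      · simpa [pvAStep, PySem.Dict.getD_insert, Ne.symm hcust, hcust] using hf
      · simpa [pvAStep, PySem.Dict.getD_insert, Ne.symm hcust, hcust] using hc

-- ===== VERDICT (by name: the statement is the Claim_ definition above) =====
theorem get_blocked_customers_spec : Claim_equal_get_blocked_customers := by
  intro sent_ads new_ad _
  unfold Spec_get_blocked_customers get_blocked_customers get_blocked_customers_alt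
  obtain ⟨hF, hC⟩ := pv_loop_inv new_ad.1 new_ad.2.1 (PySem.Int.floordiv (new_ad.2.2 - 1) 7 + 1)
    sent_ads PySem.Dict.empty PySem.Dict.empty 0 false rfl rfl
  simp only [hF, hC, List.nil_append]
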